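-- pv_equiv track=rewrite | github.com/miliar/Code_Jam_Webscraper | solutions_python/Problem_157/413.py | find_letter
-- ===== SOURCE A (Python) =====
-- Q_MULT = {
-- 			'1': {'1':'1',	'i':'i', 	'j':'j', 	'k':'k'	},
-- 		    'i': {'1':'i',	'i':'-1', 	'j':'k', 	'k':'-j'},
-- 			'j': {'1':'j',	'i':'-k',	'j':'-1',	'k':'i'	},
-- 			'k': {'1':'k',	'i':'j',	'j':'-i',	'k':'-1'}
-- 		 }
--
-- def find_letter(index, cur_str, letter):
-- 	rest_of_str = cur_str[index:]
-- 	current_val = ''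
-- 	for i in range(len(rest_of_str)):
-- 		current_val = evaluate_next(current_val, rest_of_str[i])
-- 		if letter == current_val:
-- 			return i+1
--
-- 	return -1
--
-- def evaluate_next(current_val, next_char):
--
-- 	if current_val == '': return next_char
--
-- 	is_negative = False
-- 	if current_val[0] == '-':
-- 		is_negative = True
-- 		current_val = current_val[1]
--
-- 	new_val = Q_MULT[current_val][next_char]
--
-- 	if is_negative:
-- 		if new_val[0] == '-':
-- 			new_val = new_val[1]
-- 		else:
-- 			new_val = '-' + new_val
--
-- 	return new_val
-- ===== SOURCE B (Python) =====
-- # Two-pass group-theoretic scan: compute the total product once, then sweep BACK-TO-FRONT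
-- # recovering each prefix product as total * inverse(suffix product), keeping the smallest
-- # matching position; quaternion units are (sign, axis) pairs instead of signed strings.
-- UNIT = {'1': (1, 0), 'i': (1, 1), 'j': (1, 2), 'k': (1, 3)}
-- TARGET = {'1': (1, 0), 'i': (1, 1), 'j': (1, 2), 'k': (1, 3),
--           '-1': (-1, 0), '-i': (-1, 1), '-j': (-1, 2), '-k': (-1, 3)}
-- AX = [[(1, 0), (1, 1), (1, 2), (1, 3)],
--       [(1, 1), (-1, 0), (1, 3), (-1, 2)],
--       [(1, 2), (-1, 3), (-1, 0), (1, 1)],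
--       [(1, 3), (1, 2), (-1, 1), (-1, 0)]]
--
-- def qmul(p, q):
--     s, a = AX[p[1]][q[1]]
--     return (p[0] * q[0] * s, a)
--
-- def qinv(q):
--     return (q[0], 0) if q[1] == 0 else (-q[0], q[1])
--
-- def find_letter(index, cur_str, letter):
--     target = TARGET.get(letter)
--     if target is None:
--         return -1
--     tail = [UNIT[ch] for ch in cur_str[index:]]
--     total = (1, 0)
--     for e in tail:
--         total = qmul(total, e)
--     best = -1
--     s = (1, 0)
--     for i in range(len(tail) - 1, -1, -1):
--         if qmul(total, qinv(s)) == target: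
--             best = i + 1
--         s = qmul(tail[i], s)
--     return best
-- ===== Notes on version B (the rewrite author's own statement) =====
-- stated objective: alternative
-- what changed: Instead of A's single forward scan comparing a signed-string running product (4x4 string table) at each step, B maps units to (sign,axis) pairs, computes the total product of the tail in one forward pass, then sweeps backward maintaining suffix products and recovers each prefix product as total*inverse(suffix), keeping the smallest matching position; the target letter is resolved to a pair up front (unknown letter: -1 immediately).
-- outside the precondition, e.g. on find_letter(0, '1x', '1'): A returns 1, B raises KeyError; on find_letter(0, 'x', 'x'): A returns 1, B returns -1
import Mathlib
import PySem

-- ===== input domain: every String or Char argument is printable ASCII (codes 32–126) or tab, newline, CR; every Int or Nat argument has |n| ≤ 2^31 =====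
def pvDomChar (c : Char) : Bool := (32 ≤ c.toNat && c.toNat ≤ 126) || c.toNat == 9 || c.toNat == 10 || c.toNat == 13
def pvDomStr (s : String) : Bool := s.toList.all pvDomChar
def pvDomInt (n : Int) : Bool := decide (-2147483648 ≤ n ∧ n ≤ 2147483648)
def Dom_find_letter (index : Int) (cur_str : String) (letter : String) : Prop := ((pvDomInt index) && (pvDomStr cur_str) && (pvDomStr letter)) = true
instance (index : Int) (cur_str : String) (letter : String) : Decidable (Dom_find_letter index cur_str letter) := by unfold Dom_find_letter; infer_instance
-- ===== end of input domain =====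

-- B replaces A's forward scan of a signed-string running product (4×4 lookup table) by a
-- two-pass group-theoretic sweep: one forward pass for the total product of (sign,axis)
-- pairs, then a backward pass maintaining suffix products, recovering each prefix product
-- as total·inverse(suffix) and keeping the smallest matching position (objective: alternative).

-- ===== PORT A =====
-- strings are ported on the List Char side (PySem convention); dict lookups use getD with a
-- default that is never reached inside Pre_ (Python raises KeyError there, excluded by Pre_)
def Q_MULT : PySem.Dict (List Char) (PySem.Dict (List Char) (List Char)) :=
  PySem.Dict.mk
    [ (['1'], PySem.Dict.mk [(['1'],['1']), (['i'],['i']), (['j'],['j']), (['k'],['k'])])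
    , (['i'], PySem.Dict.mk [(['1'],['i']), (['i'],['-','1']), (['j'],['k']), (['k'],['-','j'])])
    , (['j'], PySem.Dict.mk [(['1'],['j']), (['i'],['-','k']), (['j'],['-','1']), (['k'],['i'])])
    , (['k'], PySem.Dict.mk [(['1'],['k']), (['i'],['j']), (['j'],['-','i']), (['k'],['-','1'])]) ]

def evaluate_next (current_val : List Char) (next_char : List Char) : List Char :=
  if current_val = [] then next_char
  else
    -- is_negative / current_val = current_val[1]; the [] default of pyGet? is Python's
    -- IndexError, unreachable on the signed-unit states Pre_ admits
    let is_negative := PySem.List.pyGet? current_val 0 = some '-'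
    let cv := if is_negative then
                (match PySem.List.pyGet? current_val 1 with | some c => [c] | none => [])
              else current_val
    let new_val := PySem.Dict.getD (PySem.Dict.getD Q_MULT cv (PySem.Dict.mk [])) next_char []
    if is_negative then
      (if PySem.List.pyGet? new_val 0 = some '-' then
         (match PySem.List.pyGet? new_val 1 with | some c => [c] | none => [])
       else '-' :: new_val)
    else new_val

-- for i in range(len(rest_of_str)): … with early return, state current_val
def find_letter_loopA (letter : List Char) : List Char → Int → List Char → Int
  | [], _, _ => -1
  | c :: rest, i, current_val =>
    let cv' := evaluate_next current_val [c]
    if letter = cv' then i + 1 else find_letter_loopA letter rest (i + 1) cv'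

def find_letter (index : Int) (cur_str : String) (letter : String) : Int :=
  let rest_of_str := PySem.List.slice cur_str.toList (some index) none
  find_letter_loopA letter.toList rest_of_str 0 []

-- ===== PORT B =====
-- AX[a][b]: product of the pure unit axes a,b as a (sign, axis) pair
def AXL : List (List (Int × Int)) :=
  [ [(1,0), (1,1), (1,2), (1,3)]
  , [(1,1), (-1,0), (1,3), (-1,2)]
  , [(1,2), (-1,3), (-1,0), (1,1)]
  , [(1,3), (1,2), (-1,1), (-1,0)] ]

-- qmul(p, q); the [] / (0,0) defaults are Python's IndexError, unreachable on (sign,axis) pairs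
def qmulQ (p q : Int × Int) : Int × Int :=
  let t := (PySem.List.pyGet? ((PySem.List.pyGet? AXL p.2).getD []) q.2).getD (0, 0)
  (p.1 * q.1 * t.1, t.2)

def qinvQ (q : Int × Int) : Int × Int :=
  if q.2 = 0 then (q.1, 0) else (-q.1, q.2)

-- UNIT[ch]; the (0,0) default is Python's KeyError, excluded by Pre_
def unitQ (c : Char) : Int × Int :=
  PySem.Dict.getD
    (PySem.Dict.mk [('1',((1:Int),(0:Int))), ('i',(1,1)), ('j',(1,2)), ('k',(1,3))]) c (0, 0)

-- TARGET.get(letter)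
def targetQ (letter : List Char) : Option (Int × Int) :=
  PySem.Dict.get?
    (PySem.Dict.mk
      [ (['1'],((1:Int),(0:Int))), (['i'],(1,1)), (['j'],(1,2)), (['k'],(1,3))
      , (['-','1'],(-1,0)), (['-','i'],(-1,1)), (['-','j'],(-1,2)), (['-','k'],(-1,3)) ])
    letter

-- for i in range(len(tail)-1, -1, -1): … — ported as recursion over tail.reverse with the
-- descending index i, state (best, s); the element e is tail[i]
def find_letter_loopB (t total : Int × Int) : List (Int × Int) → Int → Int → Int × Int → Int
  | [], _, best, _ => best
  | e :: rest, i, best, s =>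
    let best' := if qmulQ total (qinvQ s) = t then i + 1 else best
    find_letter_loopB t total rest (i - 1) best' (qmulQ e s)

def find_letter_alt (index : Int) (cur_str : String) (letter : String) : Int :=
  match targetQ letter.toList with
  | none => -1
  | some t =>
    let tail := (PySem.List.slice cur_str.toList (some index) none).map unitQ
    let total := tail.foldl qmulQ (1, 0)
    find_letter_loopB t total tail.reverse ((tail.length : Int) - 1) (-1) (1, 0)

-- ===== PRECONDITION & SPEC =====
-- Pre_ excludes tails cur_str[index:] containing a character outside '1ijk': A raises
-- KeyError/IndexError there, except in accidental corners reached before the first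
-- multiplication with the bad character (the unchecked first character, an early match
-- before the bad character), where B's eager tuple mapping raises or returns -1 instead.
def Pre_find_letter (index : Int) (cur_str : String) (letter : String) : Prop :=
  ((PySem.List.slice cur_str.toList (some index) none).all
    (fun c => c == '1' || c == 'i' || c == 'j' || c == 'k')) = true
instance (index : Int) (cur_str : String) (letter : String) : Decidable (Pre_find_letter index cur_str letter) := by unfold Pre_find_letter; infer_instance

def pvWitness_find_letter : Int × String × String := (1, "1ijk", "-k")

def Spec_find_letter (index : Int) (cur_str : String) (letter : String) (out : Int) : Prop := out = find_letter_alt index cur_str letter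
instance (index : Int) (cur_str : String) (letter : String) (out : Int) : Decidable (Spec_find_letter index cur_str letter out) := by unfold Spec_find_letter; infer_instance

-- ===== CLAIM (what is proved, stated in full; the proofs are below) =====
def Claim_equal_find_letter : Prop := ∀ (index : Int) (cur_str : String) (letter : String), Dom_find_letter index cur_str letter → Pre_find_letter index cur_str letter → Spec_find_letter index cur_str letter (find_letter index cur_str letter)

-- ===== LEMMAS AND PROOFS =====

-- the four unit characters
def isUnit (c : Char) : Prop := c = '1' ∨ c = 'i' ∨ c = 'j' ∨ c = 'k'

-- the eight signed-unit strings A's state ranges over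
def S8 (s : List Char) : Prop :=
  s = ['1'] ∨ s = ['i'] ∨ s = ['j'] ∨ s = ['k'] ∨
  s = ['-','1'] ∨ s = ['-','i'] ∨ s = ['-','j'] ∨ s = ['-','k']

-- the eight group elements B's pairs range over
def OkQ (e : Int × Int) : Prop :=
  e = (1,0) ∨ e = (-1,0) ∨ e = (1,1) ∨ e = (-1,1) ∨
  e = (1,2) ∨ e = (-1,2) ∨ e = (1,3) ∨ e = (-1,3)

-- the pair a signed-unit string denotes; [] (A's initial state) denotes the identity
def qOf (s : List Char) : Int × Int :=
  if s = ['1'] then (1,0) else if s = ['i'] then (1,1)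
  else if s = ['j'] then (1,2) else if s = ['k'] then (1,3)
  else if s = ['-','1'] then (-1,0) else if s = ['-','i'] then (-1,1)
  else if s = ['-','j'] then (-1,2) else if s = ['-','k'] then (-1,3)
  else (1,0)

lemma qmul_ok {a b : Int × Int} (ha : OkQ a) (hb : OkQ b) : OkQ (qmulQ a b) := by
  rcases ha with h | h | h | h | h | h | h | h <;> subst h <;>
    rcases hb with h | h | h | h | h | h | h | h <;> subst h <;>
    first
      | exact Or.inl (by decide) | exact Or.inr (Or.inl (by decide))
      | exact Or.inr (Or.inr (Or.inl (by decide)))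
      | exact Or.inr (Or.inr (Or.inr (Or.inl (by decide))))
      | exact Or.inr (Or.inr (Or.inr (Or.inr (Or.inl (by decide)))))
      | exact Or.inr (Or.inr (Or.inr (Or.inr (Or.inr (Or.inl (by decide))))))
      | exact Or.inr (Or.inr (Or.inr (Or.inr (Or.inr (Or.inr (Or.inl (by decide)))))))
      | exact Or.inr (Or.inr (Or.inr (Or.inr (Or.inr (Or.inr (Or.inr (by decide)))))))

lemma qmul_assoc {a b c : Int × Int} (ha : OkQ a) (hb : OkQ b) (hc : OkQ c) :
    qmulQ (qmulQ a b) c = qmulQ a (qmulQ b c) := by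
  rcases ha with h | h | h | h | h | h | h | h <;> subst h <;>
    rcases hb with h | h | h | h | h | h | h | h <;> subst h <;>
    rcases hc with h | h | h | h | h | h | h | h <;> subst h <;> decide

lemma qmul_one_left {a : Int × Int} (ha : OkQ a) : qmulQ (1,0) a = a := by
  rcases ha with h | h | h | h | h | h | h | h <;> subst h <;> decide

lemma qmul_one_right {a : Int × Int} (ha : OkQ a) : qmulQ a (1,0) = a := by
  rcases ha with h | h | h | h | h | h | h | h <;> subst h <;> decide

lemma qcancel {p s : Int × Int} (hp : OkQ p) (hs : OkQ s) :
    qmulQ (qmulQ p s) (qinvQ s) = p := by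
  rcases hp with h | h | h | h | h | h | h | h <;> subst h <;>
    rcases hs with h | h | h | h | h | h | h | h <;> subst h <;> decide

-- the suffix product of a list of pairs (right fold)
def sufProd (l : List (Int × Int)) : Int × Int := l.foldr qmulQ (1,0)

lemma suf_ok {l : List (Int × Int)} (h : ∀ e ∈ l, OkQ e) : OkQ (sufProd l) := by
  induction l with
  | nil => exact Or.inl rfl
  | cons e r ih =>
    exact qmul_ok (h e (List.mem_cons_self ..)) (ih fun x hx => h x (List.mem_cons_of_mem _ hx))

lemma suf_append {a b : List (Int × Int)} (ha : ∀ e ∈ a, OkQ e) (hb : ∀ e ∈ b, OkQ e) :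
    sufProd (a ++ b) = qmulQ (sufProd a) (sufProd b) := by
  induction a with
  | nil => rw [List.nil_append]; exact (qmul_one_left (suf_ok hb)).symm
  | cons e r ih =>
    have he : OkQ e := ha e (List.mem_cons_self ..)
    have hr : ∀ x ∈ r, OkQ x := fun x hx => ha x (List.mem_cons_of_mem _ hx)
    show qmulQ e (sufProd (r ++ b)) = qmulQ (qmulQ e (sufProd r)) (sufProd b)
    rw [ih hr, qmul_assoc he (suf_ok hr) (suf_ok hb)]

lemma foldl_eq_suf {l : List (Int × Int)} (hl : ∀ e ∈ l, OkQ e) :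
    ∀ {p : Int × Int}, OkQ p → l.foldl qmulQ p = qmulQ p (sufProd l) := by
  induction l with
  | nil => intro p hp; simpa [sufProd] using (qmul_one_right hp).symm
  | cons e r ih =>
    intro p hp
    have he : OkQ e := hl e (List.mem_cons_self ..)
    have hr : ∀ x ∈ r, OkQ x := fun x hx => hl x (List.mem_cons_of_mem _ hx)
    show r.foldl qmulQ (qmulQ p e) = qmulQ p (qmulQ e (sufProd r))
    rw [ih hr (qmul_ok hp he), qmul_assoc hp he (suf_ok hr)]

-- the forward first-match scan both programs are proved equal to
def firstQ (t : Int × Int) : List (Int × Int) → Int → Int × Int → Int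
  | [], _, _ => -1
  | e :: r, i, p =>
    let p' := qmulQ p e
    if p' = t then i + 1 else firstQ t r (i + 1) p'

lemma first_nonneg (t : Int × Int) :
    ∀ (l : List (Int × Int)) (i : Int) (p : Int × Int), 0 ≤ i →
      firstQ t l i p = -1 ∨ i < firstQ t l i p := by
  intro l
  induction l with
  | nil => intro i p _; exact Or.inl rfl
  | cons e r ih =>
    intro i p hi
    simp only [firstQ]
    by_cases h : qmulQ p e = t
    · rw [if_pos h]; omega
    · rw [if_neg h]
      rcases ih (i + 1) (qmulQ p e) (by omega) with h' | h' <;> [exact Or.inl h'; omega]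

lemma first_snoc (t : Int × Int) :
    ∀ (m : List (Int × Int)) (e : Int × Int) (i : Int) (p : Int × Int),
      (∀ x ∈ m, OkQ x) → OkQ e → OkQ p → 0 ≤ i →
      firstQ t (m ++ [e]) i p =
        if firstQ t m i p = -1 then
          (if qmulQ p (sufProd (m ++ [e])) = t then i + m.length + 1 else -1)
        else firstQ t m i p := by
  intro m
  induction m with
  | nil =>
    intro e i p _ he _ _
    simp [firstQ, sufProd, qmul_one_right he]
  | cons a m' ih =>
    intro e i p hm he hp hi
    have ha : OkQ a := hm a (List.mem_cons_self ..)
    have hm' : ∀ x ∈ m', OkQ x := fun x hx => hm x (List.mem_cons_of_mem _ hx)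
    have hmem : ∀ x ∈ m' ++ [e], OkQ x := by
      intro x hx; rcases List.mem_append.mp hx with h | h
      · exact hm' x h
      · simpa using (List.mem_singleton.mp h) ▸ he
    simp only [List.cons_append, firstQ]
    by_cases h : qmulQ p a = t
    · rw [if_pos h, if_pos h]
      have := first_nonneg t (a :: m') i p hi
      simp only [firstQ, if_pos h] at this ⊢
      omega
    · rw [if_neg h, if_neg h]
      rw [ih e (i + 1) (qmulQ p a) hm' he (qmul_ok hp ha) (by omega)]
      have hsuf : qmulQ (qmulQ p a) (sufProd (m' ++ [e])) = qmulQ p (sufProd (a :: m' ++ [e])) := by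
        show _ = qmulQ p (qmulQ a (sufProd (m' ++ [e])))
        rw [qmul_assoc hp ha (suf_ok hmem)]
      rw [hsuf]
      have hlen : (i + 1) + (m'.length : Int) + 1 = i + ((a :: m').length : Int) + 1 := by
        simp; omega
      rw [hlen]
      simp [List.cons_append]

lemma loopB_spec (t : Int × Int) :
    ∀ (m d : List (Int × Int)) (best : Int),
      (∀ e ∈ m, OkQ e) → (∀ e ∈ d, OkQ e) →
      find_letter_loopB t (sufProd (m ++ d)) m.reverse ((m.length : Int) - 1) best (sufProd d) =
        if firstQ t m 0 (1,0) = -1 then best else firstQ t m 0 (1,0) := by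
  intro m
  induction m using List.reverseRecOn with
  | nil => intro d best _ _; simp [find_letter_loopB, firstQ]
  | append_singleton m' e ih =>
    intro d best hm hd
    have he : OkQ e := hm e (by simp)
    have hm' : ∀ x ∈ m', OkQ x := fun x hx => hm x (by simp [hx])
    have hme : ∀ x ∈ m' ++ [e], OkQ x := hm
    have hed : ∀ x ∈ e :: d, OkQ x := by
      intro x hx; rcases List.mem_cons.mp hx with h | h
      · exact h ▸ he
      · exact hd x h
    have hrev : (m' ++ [e]).reverse = e :: m'.reverse := by simp
    have hlen : ((m' ++ [e]).length : Int) - 1 = (m'.length : Int) := by simp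
    rw [hrev, hlen]
    simp only [find_letter_loopB]
    have hreassoc : (m' ++ [e]) ++ d = m' ++ (e :: d) := by simp
    have hcond : qmulQ (sufProd ((m' ++ [e]) ++ d)) (qinvQ (sufProd d)) = sufProd (m' ++ [e]) := by
      rw [suf_append hme hd]
      exact qcancel (suf_ok hme) (suf_ok hd)
    rw [hcond]
    have hs : qmulQ e (sufProd d) = sufProd (e :: d) := rfl
    rw [hs, hreassoc]
    have := ih (e :: d)
      (if sufProd (m' ++ [e]) = t then (m'.length : Int) + 1 else best) hm' hed
    rw [this]
    have hfst := first_snoc t m' e 0 (1,0) hm' he (Or.inl rfl) le_rfl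
    rw [qmul_one_left (suf_ok hme)] at hfst
    rw [hfst]
    have hfpos := first_nonneg t m' 0 (1,0) le_rfl
    have hlen0 : (0:Int) ≤ (m'.length : Int) := Int.natCast_nonneg _
    rcases hfpos with hh | hh <;> split_ifs <;> omega

-- ===== A-side correspondence =====

lemma unit_corr {c : Char} (hc : isUnit c) : OkQ (unitQ c) ∧ unitQ c = qOf [c] := by
  rcases hc with h | h | h | h <;> subst h <;>
    exact ⟨by unfold OkQ; decide, by decide⟩

lemma qOf_ok {s : List Char} (h : S8 s) : OkQ (qOf s) := by
  rcases h with h | h | h | h | h | h | h | h <;> subst h <;> (unfold OkQ; decide)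

lemma eval_corr {cv : List Char} {c : Char} (hcv : cv = [] ∨ S8 cv) (hc : isUnit c) :
    S8 (evaluate_next cv [c]) ∧ qOf (evaluate_next cv [c]) = qmulQ (qOf cv) (unitQ c) := by
  rcases hcv with h | h
  · subst h
    rcases hc with h | h | h | h <;> subst h <;> exact ⟨by unfold S8; decide, by decide⟩
  · rcases h with h | h | h | h | h | h | h | h <;> subst h <;>
      rcases hc with h | h | h | h <;> subst h <;>
      exact ⟨by unfold S8; decide, by decide⟩

lemma match_iff {letter cv : List Char} (hl : S8 letter) (hcv : S8 cv) :
    (letter = cv ↔ qOf cv = qOf letter) := by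
  rcases hl with h | h | h | h | h | h | h | h <;> subst h <;>
    rcases hcv with h | h | h | h | h | h | h | h <;> subst h <;> simp [qOf]

lemma targetQ_none {l : List Char} (h : targetQ l = none) : ¬ S8 l := by
  intro h8
  rcases h8 with h8 | h8 | h8 | h8 | h8 | h8 | h8 | h8 <;> subst h8 <;> exact absurd h (by decide)

lemma targetQ_some {l : List Char} {t : Int × Int}
    (h : targetQ l = some t) : S8 l ∧ t = qOf l := by
  simp [targetQ, PySem.Dict.get?] at h
  obtain ⟨a, h⟩ := h
  rcases h with ⟨hl, -, ht⟩ | ⟨-, ⟨hl, -, ht⟩ | ⟨-, ⟨hl, -, ht⟩ | ⟨-, ⟨hl, -, ht⟩ | ⟨-, ⟨hl, -, ht⟩ |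
    ⟨-, ⟨hl, -, ht⟩ | ⟨-, ⟨hl, -, ht⟩ | ⟨-, hl, -, ht⟩⟩⟩⟩⟩⟩⟩ <;>
    subst hl <;> subst ht <;> exact ⟨by unfold S8; simp, by decide⟩

-- A's forward loop equals the pair-valued forward scan
lemma A_eq_first {letter : List Char} (hl : S8 letter) :
    ∀ (l : List Char), (∀ c ∈ l, isUnit c) → ∀ (i : Int) (cv : List Char),
      (cv = [] ∨ S8 cv) →
      find_letter_loopA letter l i cv = firstQ (qOf letter) (l.map unitQ) i (qOf cv) := by
  intro l
  induction l with
  | nil => intro _ i cv _; rfl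
  | cons c rest ih =>
    intro hall i cv hinv
    have hc : isUnit c := hall c (List.mem_cons_self ..)
    have hrest : ∀ x ∈ rest, isUnit x := fun x hx => hall x (List.mem_cons_of_mem _ hx)
    obtain ⟨h8', hq⟩ := eval_corr hinv hc
    have hu : unitQ c = qOf [c] := (unit_corr hc).2
    simp only [find_letter_loopA, List.map_cons, firstQ]
    rw [← hq]
    by_cases hm : letter = evaluate_next cv [c]
    · rw [if_pos hm, if_pos ((match_iff hl h8').mp hm)]
    · rw [if_neg hm, if_neg (fun hq' => hm ((match_iff hl h8').mpr hq'))]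
      exact ih hrest (i + 1) (evaluate_next cv [c]) (Or.inr h8')

-- no target: A's state is always a signed unit, so a non-signed-unit letter never matches
lemma loopA_no_match (letter : List Char) (hl : ¬ S8 letter) :
    ∀ (l : List Char), (∀ c ∈ l, isUnit c) → ∀ (i : Int) (cv : List Char),
      (cv = [] ∨ S8 cv) → find_letter_loopA letter l i cv = -1 := by
  intro l
  induction l with
  | nil => intro _ _ _ _; rfl
  | cons c rest ih =>
    intro hall i cv hinv
    have hc : isUnit c := hall c (List.mem_cons_self ..)
    have hrest : ∀ x ∈ rest, isUnit x := fun x hx => hall x (List.mem_cons_of_mem _ hx)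
    have h8' : S8 (evaluate_next cv [c]) := (eval_corr hinv hc).1
    simp only [find_letter_loopA]
    have hne : letter ≠ evaluate_next cv [c] := fun he => hl (by rw [he]; exact h8')
    rw [if_neg hne]
    exact ih hrest (i + 1) _ (Or.inr h8')

-- ===== VERDICT (by name: the statement is the Claim_ definition above) =====
theorem find_letter_spec : Claim_equal_find_letter := by
  intro index cur_str letter _ hpre
  have hpre : ∀ c ∈ PySem.List.slice cur_str.toList (some index) none, isUnit c := by
    intro c hc
    have hb := List.all_eq_true.mp hpre c hc
    simp only [Bool.or_eq_true, beq_iff_eq] at hb; unfold isUnit; tauto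
  unfold Spec_find_letter find_letter find_letter_alt
  cases ht : targetQ letter.toList with
  | none =>
    exact loopA_no_match letter.toList (targetQ_none ht) _ hpre 0 [] (Or.inl rfl)
  | some t =>
    obtain ⟨h8, htq⟩ := targetQ_some ht
    subst htq
    have hokm : ∀ e ∈ (PySem.List.slice cur_str.toList (some index) none).map unitQ, OkQ e := by
      intro e he
      obtain ⟨c, hc, rfl⟩ := List.mem_map.mp he
      exact (unit_corr (hpre c hc)).1
    have hA := A_eq_first h8 _ hpre 0 [] (Or.inl rfl)
    have hqnil : qOf [] = (1,0) := rfl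
    rw [hqnil] at hA
    have htot : ((PySem.List.slice cur_str.toList (some index) none).map unitQ).foldl qmulQ (1,0)
        = sufProd (((PySem.List.slice cur_str.toList (some index) none).map unitQ) ++ []) := by
      rw [List.append_nil]
      rw [foldl_eq_suf hokm (Or.inl rfl), qmul_one_left (suf_ok hokm)]
    simp only []
    rw [htot]
    have hB := loopB_spec (qOf letter.toList)
      ((PySem.List.slice cur_str.toList (some index) none).map unitQ) [] (-1) hokm (by simp)
    have hsnil : sufProd [] = (1,0) := rfl
    rw [hsnil] at hB
    rw [hB, hA]
    by_cases hf : firstQ (qOf letter.toList) ((PySem.List.slice cur_str.toList (some index) none).map unitQ) 0 (1,0) = -1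
    · rw [if_pos hf, hf]
    · rw [if_neg hf]
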